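-- pv_equiv track=rewrite | github.com/stdapi-ai/stdapi.ai | stdapi/routes/openai_audio_translations.py | extract_subtitle_text_segments
-- ===== SOURCE A (Python) =====
-- def _is_subtitle_text_line(stripped: str) -> bool:
--     """Check if a line contains subtitle text content.
--
--     Args:
--         stripped: Current line being processed stripped of whitespace
--
--     Returns:
--         True if the line contains text content for subtitles
--     """
--     return bool(stripped and not stripped.isdigit() and "-->" not in stripped)
--
-- def _process_subtitle_segment(segments: list[str], current_segment: list[str]) -> None:
--     """Process a completed subtitle segment and add to segments list.
--
--     Args:
--         segments: List to append completed segment to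
--         current_segment: Current segment being built
--     """
--     if current_segment:
--         segments.append("\n".join(current_segment))
--         current_segment.clear()
--
-- def _should_skip_webvtt_header(stripped: str) -> bool:
--     """Determine if line should be skipped for WebVTT header processing.
--
--     Args:
--         stripped: Current line being processed stripped of whitespace
--
--     Returns:
--         Tuple of (should_skip, updated_webvtt_header_done)
--     """
--     return stripped.isdigit()  # Found first subtitle number, header done
--
-- def extract_subtitle_text_segments(subtitle_content: str) -> list[str]:
--     """Extract text segments from subtitle content while preserving structure.
--
--     Works with both SRT and VTT formats from AWS Transcribe.
--
--     Args:
--         subtitle_content: Raw subtitle content (SRT or VTT format)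
--
--     Returns:
--         List of text segments to be translated
--     """
--     segments: list[str] = []
--     lines = subtitle_content.strip().split("\n")
--     webvtt_header_done = False
--     segment: list[str] = []
--
--     for line in lines:
--         stripped = line.strip()
--         # Handle WebVTT header processing
--         if not webvtt_header_done:
--             webvtt_header_done = _should_skip_webvtt_header(stripped)
--             continue
--
--         # Process different line types
--         if _is_subtitle_text_line(stripped):
--             segment.append(line)
--         elif not line.strip():  # Empty line indicates segment boundary
--             _process_subtitle_segment(segments, segment)
--
--     # Handle final segment if file doesn't end with empty line
--     _process_subtitle_segment(segments, segment)
--     return segments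
-- ===== SOURCE B (Python) =====
-- def extract_subtitle_text_segments(subtitle_content: str) -> list[str]:
--     """Locate the header boundary (first all-digit line), then group the body
--     into blank-separated runs and join each run's subtitle-text lines."""
--     lines = subtitle_content.strip().split("\n")
--     body = None
--     for i, line in enumerate(lines):
--         if line.strip().isdigit():
--             body = lines[i + 1:]
--             break
--     if body is None:
--         return []
--     segments: list[str] = []
--     j, n = 0, len(body)
--     while j < n:
--         run = []
--         while j < n and body[j].strip():
--             run.append(body[j])
--             j += 1
--         texts = [
--             l for l in run
--             if l.strip() and not l.strip().isdigit() and "-->" not in l.strip()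
--         ]
--         if texts:
--             segments.append("\n".join(texts))
--         j += 1  # skip the blank separator
--     return segments
-- ===== Notes on version B (the rewrite author's own statement) =====
-- stated objective: alternative
-- what changed: Replaces A's single accumulate-and-flush state machine (a header-done flag plus a mutable current-segment buffer flushed on blanks and at EOF) by a two-phase decomposition: first locate the header boundary (the first all-digit line) and slice off the body, then group the body into blank-separated runs with an inner scan per run, filtering each run's text lines and joining them.
import Mathlib
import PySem

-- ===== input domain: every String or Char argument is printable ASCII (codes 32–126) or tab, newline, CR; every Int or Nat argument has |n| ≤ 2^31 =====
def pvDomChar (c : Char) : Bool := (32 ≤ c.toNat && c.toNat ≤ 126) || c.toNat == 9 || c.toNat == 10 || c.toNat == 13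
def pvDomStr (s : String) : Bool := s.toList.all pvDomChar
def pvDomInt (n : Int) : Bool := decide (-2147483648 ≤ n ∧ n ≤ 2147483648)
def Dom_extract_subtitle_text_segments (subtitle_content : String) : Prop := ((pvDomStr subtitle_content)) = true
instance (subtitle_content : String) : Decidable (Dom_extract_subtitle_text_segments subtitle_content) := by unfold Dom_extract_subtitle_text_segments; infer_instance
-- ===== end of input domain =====

-- B replaces A's accumulate-and-flush state machine by locate-header-then-group-runs (objective: alternative decomposition, same cost).

-- ===== PORT A =====
def pv_is_subtitle_text_line (stripped : String) : Bool :=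
  stripped != "" && !(PySem.Str.strIsdigit stripped) && !(PySem.Str.isIn "-->" stripped)

def pv_process_subtitle_segment (segs seg : List String) : List String × List String :=
  if seg ≠ [] then (segs ++ [PySem.Str.join "\n" seg], []) else (segs, seg)

def pvStepA (st : Bool × List String × List String) (line : String) : Bool × List String × List String :=
  let stripped := PySem.Str.strip line
  if st.1 = false then (PySem.Str.strIsdigit stripped, st.2.1, st.2.2)
  else if pv_is_subtitle_text_line stripped then (st.1, st.2.1, st.2.2 ++ [line])
  else if PySem.Str.strip line == "" then
    let p := pv_process_subtitle_segment st.2.1 st.2.2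
    (st.1, p.1, p.2)
  else (st.1, st.2.1, st.2.2)

def extract_subtitle_text_segments (subtitle_content : String) : List String :=
  let lines := (PySem.Str.split? (PySem.Str.strip subtitle_content) "\n").getD []
  let st := lines.foldl pvStepA (false, [], [])
  (pv_process_subtitle_segment st.2.1 st.2.2).1

-- ===== PORT B =====
def pvAltIsText (l : String) : Bool :=
  PySem.Str.strip l != "" && !(PySem.Str.strIsdigit (PySem.Str.strip l))
    && !(PySem.Str.isIn "-->" (PySem.Str.strip l))

def pvAltNonblank (l : String) : Bool := PySem.Str.strip l != ""

-- body = the lines after the first all-digit line (none if there is no such line)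
def pvAltBody : List String → Option (List String)
  | [] => none
  | l :: ls => if PySem.Str.strIsdigit (PySem.Str.strip l) then some ls else pvAltBody ls

-- group the body into blank-separated runs; join each run's text lines
def pvAltRuns (ls : List String) : List String :=
  if ls.isEmpty then []
  else
    let run := ls.takeWhile pvAltNonblank
    let texts := run.filter pvAltIsText
    let tail :=
      match _h : ls.dropWhile pvAltNonblank with
      | [] => []
      | _ :: r => pvAltRuns r
    if texts.isEmpty then tail else PySem.Str.join "\n" texts :: tail
termination_by ls.length
decreasing_by
  have h1 : (ls.dropWhile pvAltNonblank).length ≤ ls.length :=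
    (List.dropWhile_sublist _).length_le
  simp only [_h] at h1
  simp at h1 ⊢
  omega

def extract_subtitle_text_segments_alt (subtitle_content : String) : List String :=
  match pvAltBody ((PySem.Str.split? (PySem.Str.strip subtitle_content) "\n").getD []) with
  | none => []
  | some body => pvAltRuns body

-- ===== PRECONDITION & SPEC =====
def Spec_extract_subtitle_text_segments (subtitle_content : String) (out : List String) : Prop := out = extract_subtitle_text_segments_alt subtitle_content
instance (subtitle_content : String) (out : List String) : Decidable (Spec_extract_subtitle_text_segments subtitle_content out) := by unfold Spec_extract_subtitle_text_segments; infer_instance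

-- ===== CLAIM (what is proved, stated in full; the proofs are below) =====
def Claim_equal_extract_subtitle_text_segments : Prop := ∀ (subtitle_content : String), Dom_extract_subtitle_text_segments subtitle_content → Spec_extract_subtitle_text_segments subtitle_content (extract_subtitle_text_segments subtitle_content)

-- ===== LEMMAS AND PROOFS =====

-- the flushed form of a pending segment
def pvSeg (cur : List String) : List String :=
  if cur = [] then [] else [PySem.Str.join "\n" cur]

-- semantics of A's body phase, given the pending segment
def pvG : List String → List String → List String
  | cur, [] => pvSeg cur
  | cur, l :: ls =>
    if pv_is_subtitle_text_line (PySem.Str.strip l) then pvG (cur ++ [l]) ls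
    else if PySem.Str.strip l == "" then pvSeg cur ++ pvG [] ls
    else pvG cur ls

-- pvAltRuns with a pending prefix
def pvRunsP (cur ls : List String) : List String :=
  pvSeg (cur ++ (ls.takeWhile pvAltNonblank).filter pvAltIsText) ++
    (match ls.dropWhile pvAltNonblank with
     | [] => []
     | _ :: r => pvAltRuns r)

theorem pvAltIsText_eq (l : String) :
    pvAltIsText l = pv_is_subtitle_text_line (PySem.Str.strip l) := rfl

theorem pvAltRuns_eq (ls : List String) : pvAltRuns ls = pvRunsP [] ls := by
  cases ls with
  | nil => rw [pvAltRuns]; simp [pvRunsP, pvSeg]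
  | cons l t =>
    rw [pvAltRuns]
    cases hdw : (l :: t).dropWhile pvAltNonblank with
    | nil =>
      by_cases hT : ((l :: t).takeWhile pvAltNonblank).filter pvAltIsText = [] <;>
        simp [hdw, hT, pvRunsP, pvSeg]
    | cons x r =>
      by_cases hT : ((l :: t).takeWhile pvAltNonblank).filter pvAltIsText = [] <;>
        simp [hdw, hT, pvRunsP, pvSeg]

theorem pvG_eq_pvRunsP (ls cur : List String) : pvG cur ls = pvRunsP cur ls := by
  induction ls generalizing cur with
  | nil => simp [pvG, pvRunsP]
  | cons l ls ih =>
    by_cases ht : pv_is_subtitle_text_line (PySem.Str.strip l) = true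
    · have hnb : pvAltNonblank l = true := by
        have := ht
        simp [pv_is_subtitle_text_line] at this
        simp [pvAltNonblank, this.1]
      have hit : pvAltIsText l = true := by rw [pvAltIsText_eq, ht]
      have hG : pvG cur (l :: ls) = pvG (cur ++ [l]) ls := by simp [pvG, ht]
      rw [hG, ih]
      simp [pvRunsP, hnb, hit]
    · simp only [Bool.not_eq_true] at ht
      have hit : pvAltIsText l = false := by rw [pvAltIsText_eq, ht]
      by_cases hb : PySem.Str.strip l = ""
      · have hnb : pvAltNonblank l = false := by simp [pvAltNonblank, hb]
        have ht0 : pv_is_subtitle_text_line "" = false := by decide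
        have hG : pvG cur (l :: ls) = pvSeg cur ++ pvG [] ls := by
          simp [pvG, ht0, hb]
        rw [hG, ih, ← pvAltRuns_eq]
        simp [pvRunsP, hnb]
      · have hnb : pvAltNonblank l = true := by simp [pvAltNonblank, hb]
        have hG : pvG cur (l :: ls) = pvG cur ls := by simp [pvG, ht, hb]
        rw [hG, ih]
        simp [pvRunsP, hnb, hit]

theorem fold_header (ls : List String) (segs cur : List String) :
    ls.foldl pvStepA (false, segs, cur) =
      match pvAltBody ls with
      | none => (false, segs, cur)
      | some r => r.foldl pvStepA (true, segs, cur) := by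
  induction ls with
  | nil => rfl
  | cons l ls ih =>
    simp only [List.foldl_cons, pvStepA, pvAltBody]
    by_cases hd : PySem.Chars.strIsdigit (PySem.Chars.strip l.toList) = true
    · simp [hd]
    · simp only [Bool.not_eq_true] at hd
      simp [hd, ih]

theorem fold_body (ls : List String) (segs cur : List String) :
    (pv_process_subtitle_segment (ls.foldl pvStepA (true, segs, cur)).2.1
      (ls.foldl pvStepA (true, segs, cur)).2.2).1 = segs ++ pvG cur ls := by
  induction ls generalizing segs cur with
  | nil =>
    by_cases hc : cur = [] <;>
      simp [pvG, pv_process_subtitle_segment, pvSeg, hc]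
  | cons l ls ih =>
    rw [List.foldl_cons]
    by_cases ht : pv_is_subtitle_text_line (PySem.Str.strip l) = true
    · have hstep : pvStepA (true, segs, cur) l = (true, segs, cur ++ [l]) := by
        simp [pvStepA, ht]
      rw [hstep, ih]
      simp [pvG, ht]
    · simp only [Bool.not_eq_true] at ht
      by_cases hb : PySem.Str.strip l = ""
      · have ht0 : pv_is_subtitle_text_line "" = false := by decide
        by_cases hc : cur = []
        · have hstep : pvStepA (true, segs, cur) l = (true, segs, cur) := by
            simp [pvStepA, ht0, hb, hc, pv_process_subtitle_segment]
          rw [hstep, ih]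
          simp [pvG, ht0, hb, hc, pvSeg]
        · have hstep : pvStepA (true, segs, cur) l =
              (true, segs ++ [PySem.Str.join "\n" cur], []) := by
            simp [pvStepA, ht0, hb, hc, pv_process_subtitle_segment]
          rw [hstep, ih]
          simp [pvG, ht0, hb, hc, pvSeg]
      · have hstep : pvStepA (true, segs, cur) l = (true, segs, cur) := by
          simp [pvStepA, ht, hb]
        rw [hstep, ih]
        simp [pvG, ht, hb]

-- ===== VERDICT (by name: the statement is the Claim_ definition above) =====
theorem extract_subtitle_text_segments_spec : Claim_equal_extract_subtitle_text_segments := by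
  intro s _
  unfold Spec_extract_subtitle_text_segments extract_subtitle_text_segments extract_subtitle_text_segments_alt
  simp only [fold_header]
  cases h : pvAltBody ((PySem.Str.split? (PySem.Str.strip s) "\n").getD []) with
  | none => simp [pv_process_subtitle_segment]
  | some r =>
    simp only [fold_body, List.nil_append, pvG_eq_pvRunsP, pvAltRuns_eq]
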